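-- pv_equiv track=rewrite | github.com/Diogo-Ferreira/Social-Profile | SocialProfile/TagMiners/TagMiner.py | _map_to_mcars
-- ===== SOURCE A (Python) =====
-- def _map_to_mcars(tags, map):
--     """
--     Maps last fm tags to mcars tags
--     :param tags: last fm tags
--     :return: dict with mcars tag as key and occurences as value
--     """
--
--     out = {k: 0 for k, y in map.items()}
--
--     for tag in tags:
--         tag = str(tag).lower().replace("-", " ")
--         for k, v in map.items():
--             if tag in v:
--                 out[k] += 1
--
--     return out
-- ===== SOURCE B (Python) =====
-- def _map_to_mcars(tags, map):
--     """
--     Maps last fm tags to mcars tags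
--     :param tags: last fm tags
--     :return: dict with mcars tag as key and occurences as value
--     """
--     freq = {}
--     for t in tags:
--         w = str(t).lower().replace("-", " ")
--         freq[w] = freq.get(w, 0) + 1
--     return {k: sum(freq.get(w, 0) for w in set(v)) for k, v in map.items()}
-- ===== Notes on version B (the rewrite author's own statement) =====
-- stated objective: faster
-- what changed: Instead of rescanning every map bucket for every tag (O(|tags|*sum of bucket sizes)), B builds a frequency table of the normalized tags in one pass and then computes each bucket's count as a sum of hash-table lookups over the bucket's distinct words, flipping the loop nesting.
import Mathlib
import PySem

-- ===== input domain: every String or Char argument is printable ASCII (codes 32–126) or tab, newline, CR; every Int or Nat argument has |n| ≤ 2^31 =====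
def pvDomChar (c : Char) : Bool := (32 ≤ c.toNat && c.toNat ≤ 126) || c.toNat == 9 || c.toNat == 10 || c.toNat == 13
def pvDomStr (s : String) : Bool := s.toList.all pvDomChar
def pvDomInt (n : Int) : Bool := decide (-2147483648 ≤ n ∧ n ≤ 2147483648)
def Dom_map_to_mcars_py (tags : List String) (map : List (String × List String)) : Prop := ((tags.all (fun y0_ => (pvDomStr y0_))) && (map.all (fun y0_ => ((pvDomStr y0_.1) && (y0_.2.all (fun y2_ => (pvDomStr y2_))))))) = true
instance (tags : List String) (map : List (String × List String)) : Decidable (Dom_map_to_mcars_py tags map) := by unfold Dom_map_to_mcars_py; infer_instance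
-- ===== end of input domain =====

-- B replaces A's per-tag rescan of every bucket with one frequency table of the
-- normalized tags followed by one table-lookup sum per bucket (measured faster).


-- ===== PORT A =====
def map_to_mcars_py (tags : List String) (map : List (String × List String)) : List (String × Int) :=
  -- out = {k: 0 for k, y in map.items()}
  let out0 : PySem.Dict String Int := map.foldl (fun d kv => d.insert kv.1 0) PySem.Dict.empty
  -- for tag in tags: tag = str(tag).lower().replace("-", " "); for k, v in map.items(): if tag in v: out[k] += 1
  let out := tags.foldl (fun out tag =>
      let t := PySem.Str.replace (PySem.Str.lower tag) "-" " "
      map.foldl (fun out kv => if t ∈ kv.2 then out.modify kv.1 0 (· + 1) else out) out) out0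
  out.items

-- ===== PORT B =====
def map_to_mcars_py_alt (tags : List String) (map : List (String × List String)) : List (String × Int) :=
  -- freq = {}; for t in tags: w = str(t).lower().replace("-", " "); freq[w] = freq.get(w, 0) + 1
  let freq : PySem.Dict String Int := tags.foldl (fun d t =>
      let w := PySem.Str.replace (PySem.Str.lower t) "-" " "
      d.insert w (d.getD w 0 + 1)) PySem.Dict.empty
  -- return {k: sum(freq.get(w, 0) for w in set(v)) for k, v in map.items()}
  map.map (fun kv => (kv.1, ((PySem.Set.ofList kv.2).map (fun w => freq.getD w 0)).sum))

-- ===== PRECONDITION & SPEC =====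
-- Pre_ excludes association lists whose keys repeat: a Python dict cannot hold duplicate
-- keys, so such inputs are representation artefacts on which the two list renderings of
-- the dict comprehension accidentally disagree.
def Pre_map_to_mcars_py (tags : List String) (map : List (String × List String)) : Prop :=
  (map.map Prod.fst).Nodup
instance (tags : List String) (map : List (String × List String)) : Decidable (Pre_map_to_mcars_py tags map) := by unfold Pre_map_to_mcars_py; infer_instance
def pvWitness_map_to_mcars_py : List String × (List (String × List String)) :=
  (["Hip-Hop", "rock"], [("urban", ["hip hop", "rap"]), ("rock", ["rock"])])

def Spec_map_to_mcars_py (tags : List String) (map : List (String × List String)) (out : List (String × Int)) : Prop := out = map_to_mcars_py_alt tags map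
instance (tags : List String) (map : List (String × List String)) (out : List (String × Int)) : Decidable (Spec_map_to_mcars_py tags map out) := by unfold Spec_map_to_mcars_py; infer_instance

-- ===== CLAIM (what is proved, stated in full; the proofs are below) =====
def Claim_equal_map_to_mcars_py : Prop := ∀ (tags : List String) (map : List (String × List String)), Dom_map_to_mcars_py tags map → Pre_map_to_mcars_py tags map → Spec_map_to_mcars_py tags map (map_to_mcars_py tags map)

-- ===== LEMMAS AND PROOFS =====

-- the normalization both programs apply to a tag
def pvNorm (s : String) : String := PySem.Str.replace (PySem.Str.lower s) "-" " "

lemma pv_dictcomp_items (l : List (String × List String)) (d : PySem.Dict String Int)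
    (h : ∀ kv ∈ l, d.contains kv.1 = false) (hnd : (l.map Prod.fst).Nodup) :
    (l.foldl (fun d kv => d.insert kv.1 0) d).items = d.items ++ l.map (fun kv => (kv.1, 0)) := by
  induction l generalizing d with
  | nil => simp
  | cons kv l ih =>
    simp only [List.map_cons, List.nodup_cons] at hnd
    rw [List.forall_mem_cons] at h
    have hins : (d.insert kv.1 0) = PySem.Dict.mk (d.items ++ [(kv.1, 0)]) := by
      simp [PySem.Dict.insert, h.1]
    simp only [List.foldl_cons, hins]
    rw [ih _ ?_ hnd.2]
    · simp
    · intro kv' hkv'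
      have h1 := h.2 kv' hkv'
      have h2 : (kv.1 == kv'.1) = false := by
        refine beq_eq_false_iff_ne.2 (fun hc => hnd.1 ?_)
        exact hc ▸ List.mem_map_of_mem hkv'
      simp only [PySem.Dict.contains, List.any_append, List.any_cons, List.any_nil] at h1 ⊢
      simp [h1, h2]

lemma pv_modify_items (L : List (String × Int)) (hnd : (L.map Prod.fst).Nodup) (k : String)
    (hk : k ∈ L.map Prod.fst) (f : Int → Int) :
    ((PySem.Dict.mk L).modify k 0 f).items = L.map (fun e => if e.1 = k then (e.1, f e.2) else e) := by
  induction L with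
  | nil => simp at hk
  | cons e L ih =>
    simp only [List.map_cons, List.nodup_cons, List.mem_cons] at hnd hk
    by_cases he : e.1 = k
    · have htail : ∀ e' ∈ L, (e'.1 == k) = false := by
        intro e' he'
        refine beq_eq_false_iff_ne.2 (fun hc => hnd.1 ?_)
        exact he ▸ hc ▸ List.mem_map_of_mem he'
      have hcont : ((PySem.Dict.mk (e :: L)).contains k) = true := by
        simp [PySem.Dict.contains, List.any_cons, he]
      have hget : ((PySem.Dict.mk (e :: L)).getD k 0) = e.2 := by
        simp [PySem.Dict.getD, PySem.Dict.get?, List.find?_cons, he]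
      simp only [PySem.Dict.modify, hget]
      simp only [PySem.Dict.insert, hcont, if_true]
      apply List.map_congr_left
      intro p hp
      rcases List.mem_cons.1 hp with rfl | hp'
      · simp [he]
      · simp [htail p hp', beq_eq_false_iff_ne.1 (htail p hp')]
    · rcases hk with hk | hk
      · exact absurd hk.symm he
      · have hne : (e.1 == k) = false := beq_eq_false_iff_ne.2 he
        have hcont' : ((PySem.Dict.mk L).contains k) = true := by
          rcases List.mem_map.1 hk with ⟨e', he', h'⟩
          simp only [PySem.Dict.contains]
          exact List.any_eq_true.2 ⟨e', he', by simp [h']⟩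
        have hcont : ((PySem.Dict.mk (e :: L)).contains k) = true := by
          simp only [PySem.Dict.contains, List.any_cons] at hcont' ⊢
          simp [hcont']
        have hget : ((PySem.Dict.mk (e :: L)).getD k 0) = ((PySem.Dict.mk L).getD k 0) := by
          simp [PySem.Dict.getD, PySem.Dict.get?, List.find?_cons, hne]
        have hrec := ih hnd.2 hk
        simp only [PySem.Dict.modify] at hrec ⊢
        rw [hget]
        simp only [PySem.Dict.insert, hcont, hcont', if_true] at hrec ⊢
        rw [List.map_cons, List.map_cons, hrec]
        congr 1
        simp [hne, he]

lemma pv_inner_foldl (t : String) (ms : List (String × List String)) (L : List (String × Int))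
    (hnd : (L.map Prod.fst).Nodup) (hsub : ∀ kv ∈ ms, kv.1 ∈ L.map Prod.fst) :
    (ms.foldl (fun out kv => if t ∈ kv.2 then out.modify kv.1 0 (· + 1) else out) (PySem.Dict.mk L)).items
      = L.map (fun e => (e.1, e.2 + (ms.countP (fun kv => kv.1 == e.1 && decide (t ∈ kv.2)) : Int))) := by
  induction ms generalizing L with
  | nil => simp
  | cons kv ms ih =>
    have hsub' : ∀ kv' ∈ ms, kv'.1 ∈ L.map Prod.fst := fun kv' h => hsub kv' (List.mem_cons_of_mem _ h)
    simp only [List.foldl_cons]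
    by_cases ht : t ∈ kv.2
    · have hk : kv.1 ∈ L.map Prod.fst := hsub kv List.mem_cons_self
      rw [if_pos ht]
      have hstep : ((PySem.Dict.mk L).modify kv.1 0 (· + 1)) =
          PySem.Dict.mk (L.map fun e => if e.1 = kv.1 then (e.1, e.2 + 1) else e) := by
        conv_lhs => rw [show ((PySem.Dict.mk L).modify kv.1 0 (· + 1)) =
          PySem.Dict.mk (((PySem.Dict.mk L).modify kv.1 0 (· + 1)).items) from rfl]
        rw [pv_modify_items L hnd kv.1 hk]
      rw [hstep]
      have hcompose : Prod.fst ∘ (fun e : String × Int => if e.1 = kv.1 then (e.1, e.2 + 1) else e) = Prod.fst := by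
        funext e; by_cases h : e.1 = kv.1 <;> simp [h]
      have hkeys : (L.map fun e => if e.1 = kv.1 then (e.1, e.2 + 1) else e).map Prod.fst = L.map Prod.fst := by
        rw [List.map_map, hcompose]
      rw [ih _ (by rw [hkeys]; exact hnd) (by rw [hkeys]; exact hsub'), List.map_map]
      apply List.map_congr_left
      intro e _
      by_cases h : e.1 = kv.1
      · simp [Function.comp, h, ht]
        ring
      · have : ¬ (kv.1 = e.1) := fun he => h he.symm
        simp [Function.comp, h, this]
    · rw [if_neg ht, ih L hnd hsub']
      apply List.map_congr_left
      intro e _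
      simp [ht]

lemma pv_countP_key (t : String) (map : List (String × List String))
    (hnd : (map.map Prod.fst).Nodup) (kv : String × List String) (hmem : kv ∈ map) :
    map.countP (fun kv' => kv'.1 == kv.1 && decide (t ∈ kv'.2)) = if t ∈ kv.2 then 1 else 0 := by
  induction map with
  | nil => simp at hmem
  | cons h l ih =>
    simp only [List.map_cons, List.nodup_cons, List.mem_cons] at hnd hmem
    rcases hmem with rfl | hmem
    · have htail : l.countP (fun kv' => kv'.1 == kv.1 && decide (t ∈ kv'.2)) = 0 := by
        apply List.countP_eq_zero.2
        intro kv' hkv'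
        have : kv'.1 ≠ kv.1 := fun he => hnd.1 (he ▸ List.mem_map_of_mem hkv')
        simp [this]
      simp [List.countP_cons, htail]
    · have hne : h.1 ≠ kv.1 := by
        intro he; exact hnd.1 (he ▸ List.mem_map_of_mem hmem)
      simp [hne, ih hnd.2 hmem]

lemma pv_outer_foldl (tags : List String) (map : List (String × List String))
    (hnd : (map.map Prod.fst).Nodup) (c : String × List String → Int) :
    (tags.foldl (fun out tag =>
        let t := PySem.Str.replace (PySem.Str.lower tag) "-" " "
        map.foldl (fun out kv => if t ∈ kv.2 then out.modify kv.1 0 (· + 1) else out) out)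
      (PySem.Dict.mk (map.map (fun kv => (kv.1, c kv))))).items
      = map.map (fun kv => (kv.1, c kv + ((tags.map pvNorm).countP (fun w => decide (w ∈ kv.2)) : Int))) := by
  induction tags generalizing c with
  | nil => simp
  | cons tag tags ih =>
    simp only [List.foldl_cons]
    have hkeysL : ((map.map fun kv => (kv.1, c kv)).map Prod.fst) = map.map Prod.fst := by
      rw [List.map_map]; rfl
    have hin := pv_inner_foldl (PySem.Str.replace (PySem.Str.lower tag) "-" " ") map
      (map.map fun kv => (kv.1, c kv)) (by rw [hkeysL]; exact hnd)
      (by intro kv h; rw [hkeysL]; exact List.mem_map_of_mem h)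
    have hstep : (map.foldl (fun out kv => if (PySem.Str.replace (PySem.Str.lower tag) "-" " ") ∈ kv.2 then out.modify kv.1 0 (· + 1) else out)
          (PySem.Dict.mk (map.map (fun kv => (kv.1, c kv)))))
        = PySem.Dict.mk (map.map (fun kv => (kv.1, c kv + (if pvNorm tag ∈ kv.2 then 1 else 0)))) := by
      conv_lhs => rw [show (map.foldl (fun out kv => if (PySem.Str.replace (PySem.Str.lower tag) "-" " ") ∈ kv.2 then out.modify kv.1 0 (· + 1) else out)
          (PySem.Dict.mk (map.map (fun kv => (kv.1, c kv)))))
        = PySem.Dict.mk ((map.foldl (fun out kv => if (PySem.Str.replace (PySem.Str.lower tag) "-" " ") ∈ kv.2 then out.modify kv.1 0 (· + 1) else out)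
          (PySem.Dict.mk (map.map (fun kv => (kv.1, c kv))))).items) from rfl]
      rw [hin, List.map_map]
      congr 1
      apply List.map_congr_left
      intro kv hkv
      have := pv_countP_key (PySem.Str.replace (PySem.Str.lower tag) "-" " ") map hnd kv hkv
      simp only [Function.comp]
      rw [this]
      simp only [pvNorm]
      split_ifs <;> simp
    rw [hstep, ih (fun kv => c kv + (if pvNorm tag ∈ kv.2 then 1 else 0))]
    apply List.map_congr_left
    intro kv _
    simp only [List.map_cons, List.countP_cons]
    by_cases h : pvNorm tag ∈ kv.2
    · simp [h]
      ring
    · simp [h]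

lemma pv_A_char (tags : List String) (map : List (String × List String))
    (hnd : (map.map Prod.fst).Nodup) :
    map_to_mcars_py tags map
      = map.map (fun kv => (kv.1, ((tags.map pvNorm).countP (fun w => decide (w ∈ kv.2)) : Int))) := by
  unfold map_to_mcars_py
  have h0 : (map.foldl (fun d kv => d.insert kv.1 (0:Int)) PySem.Dict.empty)
      = PySem.Dict.mk (map.map (fun kv => (kv.1, (0 : Int)))) := by
    conv_lhs => rw [show (map.foldl (fun d kv => d.insert kv.1 (0:Int)) PySem.Dict.empty)
      = PySem.Dict.mk ((map.foldl (fun d kv => d.insert kv.1 0) PySem.Dict.empty).items) from rfl]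
    rw [pv_dictcomp_items map PySem.Dict.empty (by intro kv _; rfl) hnd]
    rfl
  simp only [h0]
  have := pv_outer_foldl tags map hnd (fun _ => 0)
  simp only [zero_add] at this
  exact this

lemma pv_sum_counts (l : List String) (S : List String) (hS : S.Nodup) :
    (S.map (fun w => (l.count w : Int))).sum = (l.countP (fun x => decide (x ∈ S)) : Int) := by
  induction l with
  | nil => simp
  | cons x l ih =>
    have hsplit : (S.map (fun w => ((x :: l).count w : Int))) =
        S.map (fun w => (l.count w : Int) + (if x == w then 1 else 0)) := by
      apply List.map_congr_left
      intro w _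
      simp [List.count_cons]
    rw [hsplit, PySem.List.sum_map_add_int, ih]
    have h2 : (S.map (fun w => if x == w then (1:Int) else 0)).sum
        = ((S.countP (fun w => x == w) : Nat) : Int) := by
      simpa using PySem.List.sum_map_ite_one_zero (fun w => x == w) S
    have h3 : S.countP (fun w => x == w) = if x ∈ S then 1 else 0 := by
      have hfun : (fun w : String => x == w) = (fun w : String => w == x) := by
        funext w; simp [eq_comm]
      have : S.countP (fun w => x == w) = S.count x := by rw [hfun]; rfl
      rw [this]
      by_cases hx : x ∈ S
      · simp [hx, List.count_eq_one_of_mem hS hx]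
      · simp [hx, List.count_eq_zero_of_not_mem hx]
    rw [h2, h3, List.countP_cons]
    by_cases hx : x ∈ S <;> simp [hx]

lemma pv_B_char (tags : List String) (map : List (String × List String)) :
    map_to_mcars_py_alt tags map
      = map.map (fun kv => (kv.1, ((tags.map pvNorm).countP (fun w => decide (w ∈ kv.2)) : Int))) := by
  unfold map_to_mcars_py_alt
  have hfreq : (tags.foldl (fun d t =>
        let w := PySem.Str.replace (PySem.Str.lower t) "-" " "
        d.insert w (d.getD w 0 + 1)) PySem.Dict.empty)
      = PySem.Dict.counter (tags.map pvNorm) := by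
    rw [← PySem.Dict.foldl_insert_getD_add_one_eq_counter, List.foldl_map]
    rfl
  simp only [hfreq]
  apply List.map_congr_left
  intro kv _
  have hgetD : ∀ w, (PySem.Dict.counter (tags.map pvNorm)).getD w 0 = ((tags.map pvNorm).count w : Int) :=
    fun w => PySem.Dict.getD_counter (tags.map pvNorm) w
  simp only [hgetD]
  rw [pv_sum_counts (tags.map pvNorm) (PySem.Set.ofList kv.2) (PySem.Set.nodup_ofList kv.2)]
  have hc : List.countP (fun x => decide (x ∈ PySem.Set.ofList kv.2)) (tags.map pvNorm)
      = List.countP (fun w => decide (w ∈ kv.2)) (tags.map pvNorm) := by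
    apply List.countP_congr
    intro w _
    simp [PySem.Set.mem_ofList]
  rw [hc]

-- ===== VERDICT (by name: the statement is the Claim_ definition above) =====
theorem map_to_mcars_py_spec : Claim_equal_map_to_mcars_py := by
  intro tags map _ hpre
  unfold Spec_map_to_mcars_py
  rw [pv_A_char tags map hpre, pv_B_char]
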